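-- pv_equiv track=rewrite | github.com/ksushinia/Binary-Trees | Graphics/AVLkeysGROWregress.py | generate_avl_heights
-- ===== SOURCE A (Python) =====
-- class Node:
--     def __init__(self, key):
--         self.key = key
--         self.height = 1
--         self.left = None
--         self.right = None
--
-- def height(node):
--     if not node:
--         return 0
--     return node.height
--
-- def right_rotate(y):
--     x = y.left
--     T2 = x.right
--     x.right = y
--     y.left = T2
--     y.height = 1 + max(height(y.left), height(y.right))
--     x.height = 1 + max(height(x.left), height(x.right))
--     return x
--
-- def left_rotate(x):
--     y = x.right
--     T2 = y.left
--     y.left = x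
--     x.right = T2
--     x.height = 1 + max(height(x.left), height(x.right))
--     y.height = 1 + max(height(y.left), height(y.right))
--     return y
--
-- def get_balance(node):
--     if not node:
--         return 0
--     return height(node.left) - height(node.right)
--
-- def insert(node, key):
--     if not node:
--         return Node(key)
--     if key < node.key:
--         node.left = insert(node.left, key)
--     elif key > node.key:
--         node.right = insert(node.right, key)
--     else:
--         return node  # Дубликаты не допускаются
--
--     # Обновление высоты текущего узла
--     node.height = 1 + max(height(node.left), height(node.right))
--
--     # Получение баланса и выполнение поворотов при необходимости
--     balance = get_balance(node)
--
--     # Левый поворот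
--     if balance > 1 and key < node.left.key:
--         return right_rotate(node)
--     # Правый поворот
--     if balance < -1 and key > node.right.key:
--         return left_rotate(node)
--     # Лево-правый поворот
--     if balance > 1 and key > node.left.key:
--         node.left = left_rotate(node.left)
--         return right_rotate(node)
--     # Право-левый поворот
--     if balance < -1 and key < node.right.key:
--         node.right = right_rotate(node.right)
--         return left_rotate(node)
--
--     return node
--
-- def generate_avl_heights(max_keys, step):
--     sizes = list(range(step, max_keys + 1, step))  # Количество ключей с шагом
--     heights = []
--
--     for size in sizes:
--         root = None
--         for key in range(1, size + 1):  # Монотонно возрастающие ключи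
--             root = insert(root, key)
--         heights.append(height(root))  # Добавляем высоту текущего дерева
--
--     return sizes, heights
-- ===== SOURCE B (Python) =====
-- def generate_avl_heights(max_keys, step):
--     # Inserting keys 1..n in increasing order into an AVL tree yields a tree of
--     # minimal height, which equals n.bit_length(); no tree needs to be built.
--     sizes = list(range(step, max_keys + 1, step))
--     heights = [max(size, 0).bit_length() for size in sizes]
--     return sizes, heights
-- ===== Notes on version B (the rewrite author's own statement) =====
-- stated objective: alternative
-- what changed: B replaces building an AVL tree by repeated insertion for every size with the closed form height = size.bit_length(), valid because sequentially inserting 1..n into an AVL tree yields a minimal-height tree (proved in Lean via an explicit characterisation of the tree shape).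
import Mathlib
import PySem

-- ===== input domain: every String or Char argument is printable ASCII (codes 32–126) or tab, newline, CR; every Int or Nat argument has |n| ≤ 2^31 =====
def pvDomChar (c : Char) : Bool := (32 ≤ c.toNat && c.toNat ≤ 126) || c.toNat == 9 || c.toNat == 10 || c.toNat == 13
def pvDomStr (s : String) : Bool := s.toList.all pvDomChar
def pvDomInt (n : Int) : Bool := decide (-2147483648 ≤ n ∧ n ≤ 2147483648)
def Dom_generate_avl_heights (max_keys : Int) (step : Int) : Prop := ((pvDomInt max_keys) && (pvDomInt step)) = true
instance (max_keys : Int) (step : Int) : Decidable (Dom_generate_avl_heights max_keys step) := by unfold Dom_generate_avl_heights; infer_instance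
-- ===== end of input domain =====

-- B replaces A's repeated AVL-tree building with the closed form height = bit_length(size)
-- (sequential insertion of 1..n yields a minimal-height AVL tree); objective: alternative.

-- ===== PORT A =====
inductive AVLTree where
  | nil : AVLTree
  | node : Int → Int → AVLTree → AVLTree → AVLTree
deriving DecidableEq, Repr

-- height(node): reads the stored height field, 0 for None
def avlHeight : AVLTree → Int
  | .nil => 0
  | .node _ h _ _ => h

-- right_rotate(y); on a tree whose left child is None Python would raise
-- (never reached from insert), the port returns the tree unchanged there
def rightRotate : AVLTree → AVLTree
  | .node ky _ (.node kx _ a t2) c =>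
      let y := AVLTree.node ky (1 + max (avlHeight t2) (avlHeight c)) t2 c
      AVLTree.node kx (1 + max (avlHeight a) (avlHeight y)) a y
  | t => t

def leftRotate : AVLTree → AVLTree
  | .node kx _ a (.node ky _ t2 c) =>
      let x := AVLTree.node kx (1 + max (avlHeight a) (avlHeight t2)) a t2
      AVLTree.node ky (1 + max (avlHeight x) (avlHeight c)) x c
  | t => t

def getBalance : AVLTree → Int
  | .nil => 0
  | .node _ _ l r => avlHeight l - avlHeight r

-- node.key accessor; Python raises on None.key (only read under balance checks
-- that guarantee the subtree is non-empty, so the 0 default is never observable)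
def rootKey : AVLTree → Int
  | .nil => 0
  | .node k _ _ _ => k

-- the tail of insert after the recursive call: height update, balance, rotations
def avlRebalance (t : AVLTree) (key : Int) : AVLTree :=
  match t with
  | .nil => .nil
  | .node k _ l r =>
      let n := AVLTree.node k (1 + max (avlHeight l) (avlHeight r)) l r
      let balance := getBalance n
      if balance > 1 ∧ key < rootKey l then rightRotate n
      else if balance < -1 ∧ key > rootKey r then leftRotate n
      else if balance > 1 ∧ key > rootKey l then
        rightRotate (AVLTree.node k (1 + max (avlHeight l) (avlHeight r)) (leftRotate l) r)
      else if balance < -1 ∧ key < rootKey r then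
        leftRotate (AVLTree.node k (1 + max (avlHeight l) (avlHeight r)) l (rightRotate r))
      else n

def avlInsert : AVLTree → Int → AVLTree
  | .nil, key => .node key 1 .nil .nil
  | .node k h l r, key =>
      if key < k then avlRebalance (AVLTree.node k h (avlInsert l key) r) key
      else if key > k then avlRebalance (AVLTree.node k h l (avlInsert r key)) key
      else .node k h l r

def generate_avl_heights (max_keys : Int) (step : Int) : List Int × List Int :=
  let sizes := PySem.List.pyRange step (max_keys + 1) step
  let heights := sizes.foldl (fun hs size =>
      let root := (PySem.List.pyRange 1 (size + 1) 1).foldl (fun r key => avlInsert r key) AVLTree.nil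
      hs ++ [avlHeight root]) []
  (sizes, heights)

-- ===== PORT B =====
-- max(size, 0).bit_length()
def pyBitLength (n : Int) : Int := Int.ofNat (Nat.size (max n 0).toNat)

def generate_avl_heights_alt (max_keys : Int) (step : Int) : List Int × List Int :=
  let sizes := PySem.List.pyRange step (max_keys + 1) step
  (sizes, sizes.map pyBitLength)

-- ===== PRECONDITION & SPEC =====
-- Pre_ excludes only step = 0, on which Python's range(...) raises ValueError in both A and B.
def Pre_generate_avl_heights (max_keys : Int) (step : Int) : Prop := step ≠ 0
instance (max_keys : Int) (step : Int) : Decidable (Pre_generate_avl_heights max_keys step) := by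
  unfold Pre_generate_avl_heights; infer_instance

def pvWitness_generate_avl_heights : Int × Int := (10, 2)

def Spec_generate_avl_heights (max_keys : Int) (step : Int) (out : List Int × List Int) : Prop := out = generate_avl_heights_alt max_keys step
instance (max_keys : Int) (step : Int) (out : List Int × List Int) : Decidable (Spec_generate_avl_heights max_keys step out) := by unfold Spec_generate_avl_heights; infer_instance

-- ===== CLAIM (what is proved, stated in full; the proofs are below) =====
def Claim_equal_generate_avl_heights : Prop := ∀ (max_keys : Int) (step : Int), Dom_generate_avl_heights max_keys step → Pre_generate_avl_heights max_keys step → Spec_generate_avl_heights max_keys step (generate_avl_heights max_keys step)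

-- ===== LEMMAS AND PROOFS =====

-- the exact tree A builds from keys a+1 .. a+n inserted in increasing order:
-- a perfect left subtree of 2^j - 1 keys, j = (n/3).size, and the rest on the right
def perfectT : Nat → Int → AVLTree
  | 0, _ => .nil
  | j+1, a => .node (a + 2^j) ((j : Int) + 1) (perfectT j a) (perfectT j (a + 2^j))

def mkT (n : Nat) (a : Int) : AVLTree :=
  if _h : n = 0 then .nil
  else
    let j := Nat.size (n / 3)
    .node (a + 2^j) (Nat.size n : Int) (perfectT j a) (mkT (n - 2^j) (a + 2^j))
termination_by n
decreasing_by
  have : 0 < 2 ^ Nat.size (n / 3) := Nat.two_pow_pos _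
  omega

lemma size_eq_of {m k : Nat} (h1 : 2^k ≤ m) (h2 : m < 2^(k+1)) : Nat.size m = k + 1 := by
  have a1 := Nat.lt_size.2 h1
  have a2 := Nat.size_le.2 h2
  omega

lemma height_perfectT (j : Nat) (a : Int) : avlHeight (perfectT j a) = (j : Int) := by
  cases j <;> simp [perfectT, avlHeight]

lemma two_pow_size_le {n : Nat} (hn : 1 ≤ n) : 2 ^ Nat.size (n / 3) ≤ n := by
  rcases Nat.eq_zero_or_pos (n / 3) with h | h
  · simp [h, Nat.size_zero]; omega
  · have h2 : 1 ≤ Nat.size (n / 3) := Nat.lt_size.2 (by simp; omega)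
    have h1 : 2 ^ (Nat.size (n / 3) - 1) ≤ n / 3 := Nat.lt_size.1 (by omega)
    have : 2 ^ Nat.size (n / 3) ≤ 2 * (n / 3) := by
      calc 2 ^ Nat.size (n / 3) = 2 * 2 ^ (Nat.size (n / 3) - 1) := by
            rw [← pow_succ']; congr 1; omega
        _ ≤ 2 * (n / 3) := by omega
    have := Nat.div_mul_le_self n 3
    omega

lemma lt_three_two_pow_size {n : Nat} (_hn : 1 ≤ n) : n < 3 * 2 ^ Nat.size (n / 3) := by
  have h1 : n / 3 < 2 ^ Nat.size (n / 3) := Nat.lt_size_self _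
  omega

lemma three_le_two_mul {n : Nat} (h : 1 ≤ n / 3) : 3 * 2 ^ Nat.size (n / 3) ≤ 6 * (n / 3) := by
  have h2 : 1 ≤ Nat.size (n / 3) := Nat.lt_size.2 (by simp; omega)
  have h1 : 2 ^ (Nat.size (n / 3) - 1) ≤ n / 3 := Nat.lt_size.1 (by omega)
  have : 2 ^ Nat.size (n / 3) = 2 * 2 ^ (Nat.size (n / 3) - 1) := by
    rw [← pow_succ']; congr 1; omega
  omega

lemma height_mkT (n : Nat) (a : Int) : avlHeight (mkT n a) = (Nat.size n : Int) := by
  rw [mkT]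
  by_cases h : n = 0
  · simp [h, avlHeight, Nat.size_zero]
  · simp [h, avlHeight]

-- unfolding lemmas and rebalance shapes
lemma mkT_pos (n : Nat) (a : Int) (h0 : n ≠ 0) :
    mkT n a = .node (a + 2^(Nat.size (n/3))) (Nat.size n : Int) (perfectT (Nat.size (n/3)) a)
      (mkT (n - 2^(Nat.size (n/3))) (a + 2^(Nat.size (n/3)))) := by
  rw [mkT]; simp [h0]

lemma avlRebalance_node (k h : Int) (l r : AVLTree) (key : Int) :
    avlRebalance (.node k h l r) key =
      (if avlHeight l - avlHeight r > 1 ∧ key < rootKey l then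
        rightRotate (.node k (1 + max (avlHeight l) (avlHeight r)) l r)
      else if avlHeight l - avlHeight r < -1 ∧ key > rootKey r then
        leftRotate (.node k (1 + max (avlHeight l) (avlHeight r)) l r)
      else if avlHeight l - avlHeight r > 1 ∧ key > rootKey l then
        rightRotate (AVLTree.node k (1 + max (avlHeight l) (avlHeight r)) (leftRotate l) r)
      else if avlHeight l - avlHeight r < -1 ∧ key < rootKey r then
        leftRotate (AVLTree.node k (1 + max (avlHeight l) (avlHeight r)) l (rightRotate r))
      else .node k (1 + max (avlHeight l) (avlHeight r)) l r) := by
  rfl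

lemma size_two_pow_succ_div_three (j : Nat) : Nat.size (2^(j+1)/3) = j := by
  cases j with
  | zero => norm_num
  | succ i =>
      have e2 : (2:Nat)^(i+2) = 4 * 2^i := by ring
      have e1 : (2:Nat)^(i+1) = 2 * 2^i := by ring
      have hp : 0 < (2:Nat)^i := Nat.two_pow_pos i
      have g1 : 2^i * 3 ≤ 2^(i+2) := by rw [e2]; omega
      have g2 : (2:Nat)^(i+2) < 2^(i+1) * 3 := by rw [e1, e2]; omega
      exact size_eq_of (Nat.le_div_iff_mul_le (by omega) |>.2 g1)
        (Nat.div_lt_iff_lt_mul (by omega) |>.2 g2)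

lemma avlHeight_node (k h : Int) (l r : AVLTree) : avlHeight (.node k h l r) = h := rfl

lemma rootKey_node (k h : Int) (l r : AVLTree) : rootKey (.node k h l r) = k := rfl

-- rebalancing after inserting key a+n+1: the recursive insertion on the right
-- has already produced mkT (n - 2^J + 1)
lemma rebalance_step (n : Nat) (a : Int) (h1n : 1 ≤ n) :
    avlRebalance (.node (a + (2:Int)^(Nat.size (n/3))) (Nat.size n : Int) (perfectT (Nat.size (n/3)) a)
        (mkT (n - 2^(Nat.size (n/3)) + 1) (a + (2:Int)^(Nat.size (n/3))))) (a + n + 1)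
      = mkT (n+1) a := by
  have hrn : 2^(Nat.size (n/3)) ≤ n := two_pow_size_le h1n
  have hub : n < 3 * 2^(Nat.size (n/3)) := lt_three_two_pow_size h1n
  set J := Nat.size (n/3) with hJ
  have hrpos : 0 < 2^J := Nat.two_pow_pos J
  have hposI : (0:Int) < 2^J := by positivity
  have epow : (2:Nat)^(J+1) = 2 * 2^J := by ring
  rw [avlRebalance_node]
  by_cases hA : n + 1 = 3 * 2^J
  · -- rotation case: n+1 = 3·2^J, the right subtree has grown to 2^(J+1) keys
    have hnr : n - 2^J + 1 = 2^(J+1) := by rw [epow]; omega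
    rw [hnr, mkT_pos (2^(J+1)) (a + (2:Int)^J) (by positivity), size_two_pow_succ_div_three J,
      Nat.size_pow]
    have h21 : 2^(J+1) - 2^J = 2^J := by rw [epow]; omega
    rw [h21]
    simp only [avlHeight_node, height_perfectT, rootKey_node]
    have hAI : ((n:Int)) + 1 = 3 * (2:Int)^J := by exact_mod_cast hA
    rw [if_neg (by rintro ⟨h1, -⟩; omega), if_pos ⟨by omega, by omega⟩]
    simp only [leftRotate, avlHeight_node, height_perfectT, height_mkT]
    have h3 : (n+1)/3 = 2^J := by rw [hA]; exact Nat.mul_div_cancel_left _ (by norm_num)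
    have e4 : (2:Nat)^(J+2) = 4 * 2^J := by ring
    have hsize : Nat.size (n+1) = J+2 := size_eq_of (k := J+1) (by rw [epow]; omega) (by rw [e4]; omega)
    rw [mkT_pos (n+1) a (by omega), h3, Nat.size_pow, hsize]
    congr 1
    · rw [pow_succ]; ring
    · omega
    · simp only [perfectT]
      congr 1
      push_cast; omega
    · congr 1
      · rw [epow]; omega
      · rw [pow_succ]; ring
  · -- no rotation: n+1 < 3·2^J, balance stays in {-1, 0}
    have hB : n + 1 < 3 * 2^J := by omega
    set s := Nat.size (n - 2^J + 1) with hs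
    have hs2 : s ≤ J + 1 := Nat.size_le.2 (by rw [epow]; omega)
    have hs1 : J ≤ s := by
      rcases Nat.eq_zero_or_pos J with h | h
      · omega
      · have hm : 1 ≤ n / 3 := by
          by_contra hc
          have h30 : n / 3 = 0 := by omega
          have : J = 0 := by rw [hJ, h30, Nat.size_zero]
          omega
        have h6 : 3 * 2^J ≤ 6 * (n / 3) := three_le_two_mul hm
        obtain ⟨K, hK⟩ : ∃ K, J = K + 1 := ⟨J - 1, by omega⟩
        have el : (2:Nat)^J = 2 * 2^K := by rw [hK]; ring
        have h2K : 2^K ≤ n - 2^J + 1 := by omega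
        have := Nat.lt_size.2 h2K
        omega
    simp only [height_perfectT, height_mkT]
    rw [if_neg (by rintro ⟨h1, -⟩; omega), if_neg (by rintro ⟨h1, -⟩; omega),
      if_neg (by rintro ⟨h1, -⟩; omega), if_neg (by rintro ⟨h1, -⟩; omega)]
    have hj' : Nat.size ((n+1)/3) = J := by
      have hmono : Nat.size (n/3) ≤ Nat.size ((n+1)/3) :=
        Nat.size_le_size (Nat.div_le_div_right (by omega))
      have hlt : (n+1)/3 < 2^J := by omega
      have := Nat.size_le.2 hlt
      omega
    have hheight : Nat.size (n+1) = 1 + max J s := by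
      rcases lt_or_ge (n+1) (2 * 2^J) with hc | hc
      · have h1 : Nat.size (n+1) = J + 1 := size_eq_of (by omega) (by rw [epow]; omega)
        have h2 : s ≤ J := Nat.size_le.2 (by omega)
        omega
      · have e4 : (2:Nat)^(J+2) = 4 * 2^J := by ring
        have h1 : Nat.size (n+1) = J + 2 :=
          size_eq_of (k := J+1) (by rw [epow]; omega) (by rw [e4]; omega)
        have h2 : s = J + 1 := size_eq_of (by omega) (by rw [epow]; omega)
        omega
    rw [mkT_pos (n+1) a (by omega), hj', hheight]
    have harg : n + 1 - 2^J = n - 2^J + 1 := by omega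
    rw [harg]
    congr 1
    push_cast
    omega

-- the crux: one more sequential insertion preserves the mkT shape
lemma insert_mkT : ∀ (n : Nat) (a : Int), avlInsert (mkT n a) (a + n + 1) = mkT (n+1) a := by
  intro n
  induction n using Nat.strong_induction_on with
  | _ n IH =>
    intro a
    by_cases h0 : n = 0
    · subst h0
      rw [mkT_pos 1 a (by omega), mkT, mkT]
      norm_num [avlInsert, perfectT, Nat.size_one]
    · have h1n : 1 ≤ n := by omega
      have hrn : 2^(Nat.size (n/3)) ≤ n := two_pow_size_le h1n
      have hrnI : ((2:Int)^(Nat.size (n/3))) ≤ (n : Int) := by exact_mod_cast hrn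
      rw [mkT_pos n a h0]
      simp only [avlInsert]
      rw [if_neg (by omega), if_pos (by omega)]
      rw [show a + (n:Int) + 1 = (a + (2:Int)^(Nat.size (n/3))) + ((n - 2^(Nat.size (n/3)) : Nat) : Int) + 1 from by
        rw [Nat.cast_sub hrn]; push_cast; ring]
      rw [IH (n - 2^(Nat.size (n/3))) (by have := Nat.two_pow_pos (Nat.size (n/3)); omega) (a + (2:Int)^(Nat.size (n/3)))]
      rw [show (a + (2:Int)^(Nat.size (n/3))) + ((n - 2^(Nat.size (n/3)) : Nat) : Int) + 1 = a + (n:Int) + 1 from by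
        rw [Nat.cast_sub hrn]; push_cast; ring]
      exact rebalance_step n a h1n

lemma build_eq (n : Nat) :
    (PySem.List.pyRange 1 ((n : Int) + 1) 1).foldl (fun r key => avlInsert r key) AVLTree.nil = mkT n 0 := by
  induction n with
  | zero => rw [PySem.List.pyRange_one_eq_nil (by norm_num)]; rw [mkT]; simp
  | succ m ih =>
      have hc : ((m + 1 : Nat) : Int) + 1 = ((m : Int) + 1) + 1 := by push_cast; ring
      rw [hc, PySem.List.pyRange_one_succ_right (by omega), List.foldl_append]
      simp only [List.foldl, ih]
      have := insert_mkT m 0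
      simpa using this

lemma height_build (s : Int) :
    avlHeight ((PySem.List.pyRange 1 (s + 1) 1).foldl (fun r key => avlInsert r key) AVLTree.nil)
      = pyBitLength s := by
  by_cases hs : s ≤ 0
  · rw [PySem.List.pyRange_one_eq_nil (by omega)]
    simp [avlHeight, pyBitLength]
    rw [Int.toNat_eq_zero.2 (by omega)]
    simp [Nat.size_zero]
  · replace hs : 0 < s := by omega
    have hrepr : s = ((s.toNat : Int)) := by omega
    rw [hrepr, build_eq s.toNat, height_mkT, pyBitLength]
    congr 1
    rw [max_eq_left (by omega), Int.toNat_natCast]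

-- ===== VERDICT (by name: the statement is the Claim_ definition above) =====
theorem generate_avl_heights_spec : Claim_equal_generate_avl_heights := by
  intro max_keys step _dom _pre
  unfold Spec_generate_avl_heights generate_avl_heights generate_avl_heights_alt
  simp only [PySem.List.foldl_append_singleton_eq_map, List.nil_append]
  congr 1
  exact List.map_congr_left (fun s _ => height_build s)
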